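-- pv_equiv track=rewrite | github.com/zacheyns-sudo/study-buddy | app.py | chunk_paragraphs
-- ===== SOURCE A (Python) =====
-- MAX_CHARS = 120_000
--
-- def chunk_paragraphs(paragraphs, max_chars=MAX_CHARS):
--     result, total = [], 0
--     for p in paragraphs:
--         if total + len(p) > max_chars:
--             break
--         result.append(p)
--         total += len(p) + 2
--     return result, len(result) < len(paragraphs)
-- ===== SOURCE B (Python) =====
-- from itertools import accumulate
-- from bisect import bisect_right
--
-- MAX_CHARS = 120_000
--
-- def chunk_paragraphs(paragraphs, max_chars=MAX_CHARS):
--     cum = list(accumulate(len(p) + 2 for p in paragraphs))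
--     count = bisect_right(cum, max_chars + 2)
--     return list(paragraphs[:count]), count < len(paragraphs)
-- ===== Notes on version B (the rewrite author's own statement) =====
-- stated objective: alternative
-- what changed: Replaces the early-breaking accumulator loop with a cumulative-length prefix table plus a binary search (bisect_right on cum with threshold max_chars+2) that yields the cut index directly.
import Mathlib
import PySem

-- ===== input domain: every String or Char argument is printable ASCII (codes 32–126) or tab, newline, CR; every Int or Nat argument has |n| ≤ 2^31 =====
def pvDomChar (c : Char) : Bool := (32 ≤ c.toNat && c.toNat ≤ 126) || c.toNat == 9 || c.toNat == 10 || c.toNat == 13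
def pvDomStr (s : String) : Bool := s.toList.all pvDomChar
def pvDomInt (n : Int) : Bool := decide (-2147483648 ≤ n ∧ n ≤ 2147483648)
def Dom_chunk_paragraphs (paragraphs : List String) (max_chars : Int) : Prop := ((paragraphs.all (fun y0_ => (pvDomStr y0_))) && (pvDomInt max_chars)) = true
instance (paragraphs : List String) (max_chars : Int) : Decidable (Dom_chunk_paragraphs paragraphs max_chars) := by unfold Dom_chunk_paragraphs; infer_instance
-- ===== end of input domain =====

-- B replaces A's early-breaking accumulator loop by a cumulative-length table searched
-- with bisect_right (alternative decomposition; same asymptotic cost).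

-- ===== PORT A =====
-- the for-loop with break: state (result, total), stop at the first too-long paragraph
def chunkA_go (max_chars : Int) : List String → List String → Int → List String
  | [], result, _ => result
  | p :: ps, result, total =>
    if total + PySem.Str.len p > max_chars then result
    else chunkA_go max_chars ps (result ++ [p]) (total + PySem.Str.len p + 2)

def chunk_paragraphs (paragraphs : List String) (max_chars : Int) : List String × Bool :=
  let result := chunkA_go max_chars paragraphs [] 0
  (result, decide (result.length < paragraphs.length))

-- ===== PORT B =====
-- itertools.accumulate (running sums, no leading zero)
def chunkB_accum (t : Int) : List Int → List Int
  | [] => []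
  | x :: xs => (t + x) :: chunkB_accum (t + x) xs

def chunk_paragraphs_alt (paragraphs : List String) (max_chars : Int) : List String × Bool :=
  let cum := chunkB_accum 0 (paragraphs.map (fun p => PySem.Str.len p + 2))
  let count := PySem.List.bisectRight cum (max_chars + 2)
  (paragraphs.take count, decide (count < paragraphs.length))

-- ===== PRECONDITION & SPEC =====
def Spec_chunk_paragraphs (paragraphs : List String) (max_chars : Int) (out : List String × Bool) : Prop := out = chunk_paragraphs_alt paragraphs max_chars
instance (paragraphs : List String) (max_chars : Int) (out : List String × Bool) : Decidable (Spec_chunk_paragraphs paragraphs max_chars out) := by unfold Spec_chunk_paragraphs; infer_instance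

-- ===== CLAIM (what is proved, stated in full; the proofs are below) =====
def Claim_equal_chunk_paragraphs : Prop := ∀ (paragraphs : List String) (max_chars : Int), Dom_chunk_paragraphs paragraphs max_chars → Spec_chunk_paragraphs paragraphs max_chars (chunk_paragraphs paragraphs max_chars)

-- ===== LEMMAS AND PROOFS =====

-- the number of paragraphs A's loop keeps, as a recursive count
def chunkCnt (max_chars : Int) : List String → Int → Nat
  | [], _ => 0
  | p :: ps, t =>
    if t + PySem.Str.len p > max_chars then 0
    else chunkCnt max_chars ps (t + PySem.Str.len p + 2) + 1

theorem chunkA_go_eq_take (max_chars : Int) :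
    ∀ (ps acc : List String) (t : Int),
      chunkA_go max_chars ps acc t = acc ++ ps.take (chunkCnt max_chars ps t) := by
  intro ps
  induction ps with
  | nil => intro acc t; simp [chunkA_go, chunkCnt]
  | cons p rest ih =>
    intro acc t
    simp only [chunkA_go, chunkCnt]
    split_ifs with h
    · simp
    · rw [ih, List.take_succ_cons]
      simp

theorem chunkB_accum_length (l : List Int) : ∀ t, (chunkB_accum t l).length = l.length := by
  induction l with
  | nil => intro t; simp [chunkB_accum]
  | cons x xs ih => intro t; simp [chunkB_accum, ih]

theorem chunkB_accum_lb (l : List Int) :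
    ∀ (t x : Int), (∀ y ∈ l, (0:Int) ≤ y) → x ∈ chunkB_accum t l → t ≤ x := by
  induction l with
  | nil => intro t x _ hx; simp [chunkB_accum] at hx
  | cons y ys ih =>
    intro t x hnn hx
    have hy : (0:Int) ≤ y := hnn y (by simp)
    simp only [chunkB_accum, List.mem_cons] at hx
    rcases hx with h | h
    · omega
    · have := ih (t + y) x (fun z hz => hnn z (by simp [hz])) h
      omega

theorem chunkB_accum_sorted (l : List Int) :
    ∀ (t : Int), (∀ y ∈ l, (0:Int) ≤ y) → (chunkB_accum t l).Pairwise (· ≤ ·) := by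
  induction l with
  | nil => intro t _; simp [chunkB_accum]
  | cons y ys ih =>
    intro t hnn
    simp only [chunkB_accum, List.pairwise_cons]
    refine ⟨fun a ha => chunkB_accum_lb ys (t + y) a (fun z hz => hnn z (by simp [hz])) ha,
      ih (t + y) (fun z hz => hnn z (by simp [hz]))⟩

-- the count splits the cumulative sums at the threshold max_chars + 2
theorem chunkCnt_props (max_chars : Int) :
    ∀ (ps : List String) (t : Int),
      chunkCnt max_chars ps t ≤ ps.length ∧
      (∀ (j : Nat) (hj : j < (chunkB_accum t (ps.map (fun p => PySem.Str.len p + 2))).length),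
          j < chunkCnt max_chars ps t →
          (chunkB_accum t (ps.map (fun p => PySem.Str.len p + 2)))[j] ≤ max_chars + 2) ∧
      (∀ (j : Nat) (hj : j < (chunkB_accum t (ps.map (fun p => PySem.Str.len p + 2))).length),
          chunkCnt max_chars ps t ≤ j →
          max_chars + 2 < (chunkB_accum t (ps.map (fun p => PySem.Str.len p + 2)))[j]) := by
  intro ps
  induction ps with
  | nil =>
    intro t
    refine ⟨by simp [chunkCnt], ?_, ?_⟩ <;>
      · intro j hj
        simp [chunkB_accum] at hj
  | cons p rest ih =>
    intro t
    have hnn : ∀ y ∈ rest.map (fun p => PySem.Str.len p + 2), (0:Int) ≤ y := by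
      intro y hy
      simp only [List.mem_map] at hy
      obtain ⟨q, _, rfl⟩ := hy
      have : (0:Int) ≤ PySem.Str.len q := by rw [PySem.Str.len_eq]; positivity
      omega
    have hacc : chunkB_accum t ((p :: rest).map (fun p => PySem.Str.len p + 2)) =
        (t + (PySem.Str.len p + 2)) ::
          chunkB_accum (t + (PySem.Str.len p + 2)) (rest.map (fun p => PySem.Str.len p + 2)) := rfl
    by_cases h : t + PySem.Str.len p > max_chars
    · -- break immediately: every cumulative sum exceeds the threshold
      refine ⟨?_, ?_, ?_⟩
      · simp only [chunkCnt]; rw [if_pos h]; simp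
      · intro j hj hlt
        simp only [chunkCnt] at hlt; rw [if_pos h] at hlt; omega
      · intro j hj _
        simp only [hacc] at hj ⊢
        match j, hj with
        | 0, _ => simp only [List.getElem_cons_zero]; omega
        | j + 1, hj =>
          simp only [List.getElem_cons_succ]
          have hj' : j < (chunkB_accum (t + (PySem.Str.len p + 2))
              (rest.map (fun p => PySem.Str.len p + 2))).length := by
            simpa using hj
          have hlb := chunkB_accum_lb _ _ _ hnn (List.getElem_mem hj')
          omega
    · -- include p, shift by one
      obtain ⟨ih1, ih2, ih3⟩ := ih (t + PySem.Str.len p + 2)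
      have harith : t + (PySem.Str.len p + 2) = t + PySem.Str.len p + 2 := by ring
      rw [harith] at hacc
      refine ⟨?_, ?_, ?_⟩
      · simp only [chunkCnt]; rw [if_neg h]; simp only [List.length_cons]; omega
      · intro j hj hlt
        simp only [chunkCnt] at hlt; rw [if_neg h] at hlt
        simp only [hacc] at hj ⊢
        match j, hlt, hj with
        | 0, _, _ => simp only [List.getElem_cons_zero]; omega
        | j + 1, hlt, hj =>
          simp only [List.getElem_cons_succ]
          exact ih2 j (by simpa using hj) (by omega)
      · intro j hj hge
        simp only [chunkCnt] at hge; rw [if_neg h] at hge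
        simp only [hacc] at hj ⊢
        match j, hge, hj with
        | 0, hge, _ => omega
        | j + 1, hge, hj =>
          simp only [List.getElem_cons_succ]
          exact ih3 j (by simpa using hj) (by omega)

theorem chunkCnt_eq_bisect (max_chars : Int) (ps : List String) :
    chunkCnt max_chars ps 0 =
      PySem.List.bisectRight (chunkB_accum 0 (ps.map (fun p => PySem.Str.len p + 2))) (max_chars + 2) := by
  set cum := chunkB_accum 0 (ps.map (fun p => PySem.Str.len p + 2)) with hcum
  have hnn : ∀ y ∈ ps.map (fun p => PySem.Str.len p + 2), (0:Int) ≤ y := by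
    intro y hy
    simp only [List.mem_map] at hy
    obtain ⟨q, _, rfl⟩ := hy
    have : (0:Int) ≤ PySem.Str.len q := by rw [PySem.Str.len_eq]; positivity
    omega
  have hsorted : cum.Pairwise (· ≤ ·) := chunkB_accum_sorted _ 0 hnn
  obtain ⟨hb1, hb2, hb3⟩ := PySem.List.bisectRight_spec cum (max_chars + 2) hsorted
  obtain ⟨hc1, hc2, hc3⟩ := chunkCnt_props max_chars ps 0
  rw [← hcum] at hc2 hc3
  have hclen : chunkCnt max_chars ps 0 ≤ cum.length := by
    rw [hcum, chunkB_accum_length, List.length_map]; exact hc1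
  set c := chunkCnt max_chars ps 0
  set b := PySem.List.bisectRight cum (max_chars + 2)
  rcases Nat.lt_trichotomy c b with h | h | h
  · have hcl : c < cum.length := lt_of_lt_of_le h hb1
    have := hb2 c hcl h
    have := hc3 c hcl le_rfl
    omega
  · exact h
  · have hbl : b < cum.length := lt_of_lt_of_le h hclen
    have := hc2 b hbl h
    have := hb3 b hbl le_rfl
    omega

-- ===== VERDICT (by name: the statement is the Claim_ definition above) =====
theorem chunk_paragraphs_spec : Claim_equal_chunk_paragraphs := by
  intro paragraphs max_chars _
  unfold Spec_chunk_paragraphs chunk_paragraphs chunk_paragraphs_alt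
  dsimp only
  rw [chunkA_go_eq_take, chunkCnt_eq_bisect]
  set k := PySem.List.bisectRight (chunkB_accum 0 (paragraphs.map (fun p => PySem.Str.len p + 2))) (max_chars + 2) with hk
  have hkle : k ≤ paragraphs.length := by
    have := (PySem.List.bisectRight_spec (chunkB_accum 0 (paragraphs.map (fun p => PySem.Str.len p + 2))) (max_chars + 2)
      (chunkB_accum_sorted _ 0 (by
        intro y hy
        simp only [List.mem_map] at hy
        obtain ⟨q, _, rfl⟩ := hy
        have : (0:Int) ≤ PySem.Str.len q := by rw [PySem.Str.len_eq]; positivity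
        omega))).1
    rw [chunkB_accum_length, List.length_map] at this
    exact this
  simp [List.length_take, Nat.min_eq_left hkle]
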